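-- pv_equiv track=rewrite | github.com/strizhechenko/codewars | snail/snail.py | director
-- ===== SOURCE A (Python) =====
-- def director(steps):
--     prev = 'up'
--     for step_count in steps:
--         prev = {
--             'up': 'right',
--             'down': 'left',
--             'left': 'up',
--             'right': 'down'
--         }.get(prev)
--         yield prev, step_count
-- ===== SOURCE B (Python) =====
-- def director(steps):
--     dirs = ('right', 'down', 'left', 'up')
--     for i, step_count in enumerate(steps):
--         yield dirs[i % 4], step_count
-- ===== Notes on version B (the rewrite author's own statement) =====
-- stated objective: idiomatic
-- what changed: B drops the 'prev' state variable and the transition dict entirely and computes each direction positionally: dirs[i % 4] over enumerate(steps), still a single lazy generator pass.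
import Mathlib
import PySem

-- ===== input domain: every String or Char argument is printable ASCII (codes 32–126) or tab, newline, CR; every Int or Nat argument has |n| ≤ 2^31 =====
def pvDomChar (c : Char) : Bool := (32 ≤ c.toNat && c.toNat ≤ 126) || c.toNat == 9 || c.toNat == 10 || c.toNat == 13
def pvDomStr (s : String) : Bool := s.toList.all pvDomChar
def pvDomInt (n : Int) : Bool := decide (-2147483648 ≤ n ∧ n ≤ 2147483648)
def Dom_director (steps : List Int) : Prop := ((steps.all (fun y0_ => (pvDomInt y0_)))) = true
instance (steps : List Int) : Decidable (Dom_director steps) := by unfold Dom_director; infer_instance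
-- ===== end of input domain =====

-- ===== PORT A =====
-- B replaces A's prev-state transition dict with positional dirs[i % 4] over enumerate (idiomatic; return-value equivalence of the materialised generators).
-- dict.get on the four direction keys; prev only ever holds one of them, the final else is the dict's miss branch (never taken).
def aTurn (prev : String) : String :=
  if prev = "up" then "right"
  else if prev = "down" then "left"
  else if prev = "left" then "up"
  else if prev = "right" then "down"
  else prev

def director (steps : List Int) : List (String × Int) :=
  (steps.foldl (fun (st : List (String × Int) × String) step_count =>
      let prev := aTurn st.2
      (st.1 ++ [(prev, step_count)], prev))
    ([], "up")).1

-- ===== PORT B =====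
def bDirs : List String := ["right", "down", "left", "up"]

def director_alt (steps : List Int) : List (String × Int) :=
  (PySem.List.enumerate steps 0).map
    (fun p => (PySem.List.pyGetD bDirs (PySem.Int.mod p.1 4) "", p.2))

-- ===== PRECONDITION & SPEC =====
def Spec_director (steps : List Int) (out : List (String × Int)) : Prop := out = director_alt steps
instance (steps : List Int) (out : List (String × Int)) : Decidable (Spec_director steps out) := by unfold Spec_director; infer_instance

-- ===== CLAIM (what is proved, stated in full; the proofs are below) =====
def Claim_equal_director : Prop := ∀ (steps : List Int), Dom_director steps → Spec_director steps (director steps)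

-- ===== LEMMAS AND PROOFS =====
def dirIdx (k : Nat) : String := bDirs.getD (k % 4) ""

theorem aTurn_dirIdx (k : Nat) : aTurn (dirIdx (k + 3)) = dirIdx (k + 4) := by
  have h : k % 4 = 0 ∨ k % 4 = 1 ∨ k % 4 = 2 ∨ k % 4 = 3 := by omega
  have h3 : (k + 3) % 4 = (k % 4 + 3) % 4 := by omega
  have h4 : (k + 4) % 4 = k % 4 := by omega
  rcases h with h | h | h | h <;> simp [dirIdx, bDirs, aTurn, h3, h4, h]

theorem g_dirIdx (k : Nat) :
    PySem.List.pyGetD bDirs (PySem.Int.mod (k : Int) 4) "" = dirIdx k := by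
  have hm : PySem.Int.mod (k : Int) 4 = ((k % 4 : Nat) : Int) := by
    simp [PySem.Int.mod, Int.fmod_eq_emod]
  rw [hm, PySem.List.pyGetD_natCast]
  rfl

theorem loopA (steps : List Int) : ∀ (k : Nat) (acc : List (String × Int)),
    (steps.foldl (fun (st : List (String × Int) × String) step_count =>
        let prev := aTurn st.2
        (st.1 ++ [(prev, step_count)], prev))
      (acc, dirIdx (k + 3))).1
    = acc ++ (PySem.List.enumerate steps (k : Int)).map
        (fun p => (PySem.List.pyGetD bDirs (PySem.Int.mod p.1 4) "", p.2)) := by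
  induction steps with
  | nil => intro k acc; simp [PySem.List.enumerate_nil]
  | cons s rest ih =>
    intro k acc
    simp only [List.foldl_cons, PySem.List.enumerate_cons, List.map_cons]
    rw [aTurn_dirIdx k]
    have hk : dirIdx (k + 4) = dirIdx k := by
      have h : (k + 4) % 4 = k % 4 := by omega
      simp [dirIdx, h]
    have ih' := ih (k + 1) (acc ++ [(dirIdx (k + 4), s)])
    rw [show dirIdx (k + 1 + 3) = dirIdx (k + 4) by norm_num] at ih'
    push_cast at ih' ⊢
    rw [ih', g_dirIdx k, ← hk]
    simp

-- ===== VERDICT (by name: the statement is the Claim_ definition above) =====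
theorem director_spec : Claim_equal_director := by
  intro steps _
  unfold Spec_director director director_alt
  have h3 : dirIdx 3 = "up" := by rfl
  have := loopA steps 0 []
  simpa [h3] using this
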